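-- pv_equiv track=rewrite | github.com/prmpsmart/PRMP_Encrypt | app/encrypt.py | hard_en_decode
-- ===== SOURCE A (Python) =====
-- def hard_en_decode(text):
--     'As the name entails'
--
--     f = {}
--     f[chr(95)] = chr(96)
--     f[chr(96)] = chr(95)
--     f[chr(97)] = chr(126)
--     f[chr(126)] = chr(97)
--
--     for a in range(58, 65): f[chr(a)] = chr(a + 7) # +7
--     for a in range(65, 72): f[chr(a)] = chr(a - 7) # -7
--     for a in range(81, 85): f[chr(a)] = chr(a + 10) # +10
--     for a in range(91, 95): f[chr(a)] = chr(a - 10) # -10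
--     for a in range(72, 78): f[chr(a)] = chr(a + 13) # +13
--     for a in range(85, 91): f[chr(a)] = chr(a - 13) # -13
--     for a in range(78, 81): f[chr(a)] = chr(a + 45) # +45
--     for a in range(123, 126): f[chr(a)] = chr(a - 45) # -45
--     for a in range(33,  58): f[chr(a)] = chr(a + 65) # +65
--     for a in range(98,  123): f[chr(a)] = chr(a - 65) # -65
--
--     hard = ''.join(f.get(c,c) for c in text)
--
--     return hard
-- ===== SOURCE B (Python) =====
-- RULES = [(58, 65, 7), (65, 72, -7), (81, 85, 10), (91, 95, -10),
--          (72, 78, 13), (85, 91, -13), (78, 81, 45), (123, 126, -45),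
--          (33, 58, 65), (98, 123, -65)]
-- SINGLES = {95: 96, 96: 95, 97: 126, 126: 97}
--
-- def hard_en_decode(text):
--     'As the name entails'
--     out = []
--     for c in text:
--         code = ord(c)
--         if code in SINGLES:
--             out.append(chr(SINGLES[code]))
--         else:
--             for lo, hi, off in RULES:
--                 if lo <= code < hi:
--                     out.append(chr(code + off))
--                     break
--             else:
--                 out.append(c)
--     return ''.join(out)
-- ===== Notes on version B (the rewrite author's own statement) =====
-- stated objective: simpler
-- what changed: Replaces A's precomputed 104-entry char-to-char dict with ten compact (lo,hi,offset) range rules scanned per character plus four explicit singleton swaps; no table is built.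
import Mathlib
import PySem

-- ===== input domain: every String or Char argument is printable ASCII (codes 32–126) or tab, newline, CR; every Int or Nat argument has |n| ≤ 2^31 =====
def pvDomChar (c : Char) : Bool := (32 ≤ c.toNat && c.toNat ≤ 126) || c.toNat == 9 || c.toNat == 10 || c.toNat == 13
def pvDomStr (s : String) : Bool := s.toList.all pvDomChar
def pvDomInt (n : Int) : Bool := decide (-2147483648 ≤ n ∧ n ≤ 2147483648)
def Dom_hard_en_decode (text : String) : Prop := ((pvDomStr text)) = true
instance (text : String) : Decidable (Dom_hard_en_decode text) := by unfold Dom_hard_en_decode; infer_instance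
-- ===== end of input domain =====

set_option maxRecDepth 10000


-- B replaces A's dense 104-entry char→char dict with ten (lo,hi,offset) range rules
-- scanned per character plus four explicit singleton swaps (objective: simpler).

-- ===== PORT A =====
-- A builds the full substitution dict f (4 singletons, then ten range fills), then maps f.get(c, c) over the text.
def pvTableA : PySem.Dict Char Char :=
  let f : PySem.Dict Char Char := PySem.Dict.empty
  let f := f.insert (Char.ofNat 95) (Char.ofNat 96)
  let f := f.insert (Char.ofNat 96) (Char.ofNat 95)
  let f := f.insert (Char.ofNat 97) (Char.ofNat 126)
  let f := f.insert (Char.ofNat 126) (Char.ofNat 97)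
  let f := (PySem.List.pyRange 58 65 1).foldl (fun d a => d.insert (Char.ofNat (a.toNat)) (Char.ofNat ((a + 7).toNat))) f
  let f := (PySem.List.pyRange 65 72 1).foldl (fun d a => d.insert (Char.ofNat (a.toNat)) (Char.ofNat ((a - 7).toNat))) f
  let f := (PySem.List.pyRange 81 85 1).foldl (fun d a => d.insert (Char.ofNat (a.toNat)) (Char.ofNat ((a + 10).toNat))) f
  let f := (PySem.List.pyRange 91 95 1).foldl (fun d a => d.insert (Char.ofNat (a.toNat)) (Char.ofNat ((a - 10).toNat))) f
  let f := (PySem.List.pyRange 72 78 1).foldl (fun d a => d.insert (Char.ofNat (a.toNat)) (Char.ofNat ((a + 13).toNat))) f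
  let f := (PySem.List.pyRange 85 91 1).foldl (fun d a => d.insert (Char.ofNat (a.toNat)) (Char.ofNat ((a - 13).toNat))) f
  let f := (PySem.List.pyRange 78 81 1).foldl (fun d a => d.insert (Char.ofNat (a.toNat)) (Char.ofNat ((a + 45).toNat))) f
  let f := (PySem.List.pyRange 123 126 1).foldl (fun d a => d.insert (Char.ofNat (a.toNat)) (Char.ofNat ((a - 45).toNat))) f
  let f := (PySem.List.pyRange 33 58 1).foldl (fun d a => d.insert (Char.ofNat (a.toNat)) (Char.ofNat ((a + 65).toNat))) f
  let f := (PySem.List.pyRange 98 123 1).foldl (fun d a => d.insert (Char.ofNat (a.toNat)) (Char.ofNat ((a - 65).toNat))) f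
  f

def hard_en_decode (text : String) : String :=
  String.mk (text.toList.map (fun c => pvTableA.getD c c))

-- ===== PORT B =====
def pvRulesB : List (Nat × Nat × Int) :=
  [(58, 65, 7), (65, 72, -7), (81, 85, 10), (91, 95, -10),
   (72, 78, 13), (85, 91, -13), (78, 81, 45), (123, 126, -45),
   (33, 58, 65), (98, 123, -65)]

def pvEncB (c : Char) : Char :=
  let code := c.toNat
  if code == 95 then Char.ofNat 96
  else if code == 96 then Char.ofNat 95
  else if code == 97 then Char.ofNat 126
  else if code == 126 then Char.ofNat 97
  else
    match pvRulesB.find? (fun r => decide (r.1 ≤ code) && decide (code < r.2.1)) with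
    | some r => Char.ofNat (((code : Int) + r.2.2).toNat)
    | none => c

def hard_en_decode_alt (text : String) : String :=
  String.mk (text.toList.map pvEncB)

-- ===== PRECONDITION & SPEC =====
def Spec_hard_en_decode (text : String) (out : String) : Prop := out = hard_en_decode_alt text
instance (text : String) (out : String) : Decidable (Spec_hard_en_decode text out) := by unfold Spec_hard_en_decode; infer_instance

-- ===== CLAIM (what is proved, stated in full; the proofs are below) =====
def Claim_equal_hard_en_decode : Prop := ∀ (text : String), Dom_hard_en_decode text → Spec_hard_en_decode text (hard_en_decode text)

-- ===== LEMMAS AND PROOFS =====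
-- On every ASCII code point the dict lookup and the rule scan agree.
theorem pv_char_agree : ∀ n < 128, pvTableA.getD (Char.ofNat n) (Char.ofNat n) = pvEncB (Char.ofNat n) := by decide

theorem pv_char_agree' (c : Char) (h : pvDomChar c = true) :
    pvTableA.getD c c = pvEncB c := by
  have h128 : c.toNat < 128 := by
    simp [pvDomChar] at h
    omega
  have := pv_char_agree c.toNat h128
  simpa [Char.ofNat_toNat] using this

-- ===== VERDICT (by name: the statement is the Claim_ definition above) =====
theorem hard_en_decode_spec : Claim_equal_hard_en_decode := by
  intro text hdom
  unfold Spec_hard_en_decode hard_en_decode hard_en_decode_alt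
  congr 1
  apply List.map_congr_left
  intro c hc
  have hd : pvDomChar c = true := by
    have := hdom
    unfold Dom_hard_en_decode pvDomStr at this
    exact (List.all_eq_true.mp this) c hc
  exact pv_char_agree' c hd
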